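-- pv_equiv track=rewrite | github.com/judejinjin/mono-repo | libs/monitoring/prometheus.py | _sanitize_metric_name
-- ===== SOURCE A (Python) =====
-- def _sanitize_metric_name(name: str) -> str:
--     """Sanitize metric name for Prometheus."""
--     # Replace invalid characters with underscores
--     safe_name = ''.join(c if c.isalnum() else '_' for c in name.lower())
--     # Remove multiple consecutive underscores
--     while '__' in safe_name:
--         safe_name = safe_name.replace('__', '_')
--     # Remove leading/trailing underscores
--     safe_name = safe_name.strip('_')
--     # Ensure it doesn't start with a number
--     if safe_name and safe_name[0].isdigit():
--         safe_name = 'metric_' + safe_name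
--     return safe_name or 'unnamed_metric'
-- ===== SOURCE B (Python) =====
-- def _sanitize_metric_name(name: str) -> str:
--     """Sanitize metric name for Prometheus (single-pass scan)."""
--     lowered = name.lower()
--     parts = []
--     pending = False
--     for c in lowered:
--         if c.isalnum():
--             if parts and pending:
--                 parts.append('_')
--             parts.append(c)
--             pending = False
--         else:
--             pending = True
--     result = ''.join(parts)
--     if result and result[0].isdigit():
--         result = 'metric_' + result
--     return result or 'unnamed_metric'
-- ===== Notes on version B (the rewrite author's own statement) =====
-- stated objective: simpler
-- what changed: Replaced A's three-stage pipeline (mask every invalid char to an underscore, repeatedly collapse doubled underscores until a fixpoint, then strip the ends) by one left-to-right scan with a pending-separator flag that emits each alphanumeric char and at most one internal separator per run, so no repeated rewriting or stripping pass is needed.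
import Mathlib
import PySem

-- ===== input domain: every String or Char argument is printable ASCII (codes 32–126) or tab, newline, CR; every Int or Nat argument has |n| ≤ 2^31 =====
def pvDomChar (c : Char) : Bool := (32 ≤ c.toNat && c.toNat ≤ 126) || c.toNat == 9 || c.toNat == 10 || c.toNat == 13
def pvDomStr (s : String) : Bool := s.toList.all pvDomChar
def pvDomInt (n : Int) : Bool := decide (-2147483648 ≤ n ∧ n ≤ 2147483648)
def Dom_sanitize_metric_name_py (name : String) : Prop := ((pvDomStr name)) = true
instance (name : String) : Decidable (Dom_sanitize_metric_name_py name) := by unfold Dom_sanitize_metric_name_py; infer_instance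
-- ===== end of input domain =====

-- B is a single-pass scan (pending-separator flag) replacing A's mask / replace-until-fixpoint / strip pipeline; equal return value proved for all strings.

-- ===== PORT A =====
-- one pass of str.replace('__','_') (all non-overlapping occurrences, left to right), used to prove the while loop terminates
def pvRep1 : List Char → List Char
  | [] => []
  | [c] => [c]
  | a :: b :: t => if a = '_' ∧ b = '_' then '_' :: pvRep1 t else a :: pvRep1 (b :: t)

theorem pvRep1_len_le : ∀ l : List Char, (pvRep1 l).length ≤ l.length := by
  intro l
  induction l using pvRep1.induct with
  | case1 => simp [pvRep1]
  | case2 c => simp [pvRep1]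
  | case3 a b t h ih => simp only [pvRep1, if_pos h, List.length_cons]; omega
  | case4 a b t h ih =>
    simp only [pvRep1, if_neg h, List.length_cons] at ih ⊢; omega

theorem pvGo_eq_rep1 : ∀ (fuel : Nat) (l acc : List Char), l.length ≤ fuel →
    PySem.Chars.replace.go ['_','_'] ['_'] fuel l acc = acc.reverse ++ pvRep1 l := by
  intro fuel
  induction fuel with
  | zero =>
    intro l acc h
    have : l = [] := by cases l <;> simp_all
    subst this; simp [PySem.Chars.replace.go, pvRep1]
  | succ n ih =>
    intro l acc h
    match l with
    | [] => simp [PySem.Chars.replace.go, pvRep1]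
    | [c] =>
      have hp : List.isPrefixOf ['_','_'] [c] = false := by
        simp [List.isPrefixOf]
      simp only [PySem.Chars.replace.go, hp, Bool.false_eq_true]
      rw [ih [] (c :: acc) (by simp)]
      simp [pvRep1]
    | a :: b :: t =>
      by_cases hab : a = '_' ∧ b = '_'
      · obtain ⟨ha, hb⟩ := hab; subst ha; subst hb
        have hp : List.isPrefixOf ['_','_'] ('_' :: '_' :: t) = true := by
          simp [List.isPrefixOf]
        simp only [PySem.Chars.replace.go, hp, if_pos,
          show (['_','_'] : List Char).length = 2 from rfl, List.drop_succ_cons,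
          List.drop_zero, List.reverse_singleton, List.singleton_append]
        rw [ih t ('_' :: acc) (by simp at h ⊢; omega)]
        simp [pvRep1]
      · have hp : List.isPrefixOf ['_','_'] (a :: b :: t) = false := by
          rcases Decidable.not_and_iff_or_not.mp hab with h1 | h1 <;>
            simp [List.isPrefixOf, beq_iff_eq] <;> intro h2 <;> simp_all [eq_comm]
        simp only [PySem.Chars.replace.go, hp, Bool.false_eq_true]
        rw [ih (b :: t) (a :: acc) (by simp at h ⊢; omega)]
        simp [pvRep1, if_neg hab]

theorem pvReplace_eq_rep1 (l : List Char) :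
    PySem.Chars.replace l ['_','_'] ['_'] = pvRep1 l := by
  rw [PySem.Chars.replace]
  simp only [List.isEmpty_cons, Bool.false_eq_true]
  exact pvGo_eq_rep1 l.length l [] le_rfl

theorem pvRep1_len_lt (l : List Char) (h : ['_','_'] <:+: l) :
    (pvRep1 l).length < l.length := by
  induction l using pvRep1.induct with
  | case1 => exact absurd (List.IsInfix.length_le h) (by simp)
  | case2 c => exact absurd (List.IsInfix.length_le h) (by simp)
  | case3 a b t hab ih =>
    simp only [pvRep1, if_pos hab, List.length_cons]
    have := pvRep1_len_le t; omega
  | case4 a b t hab ih =>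
    have hni : ['_','_'] <:+: (b :: t) := by
      rcases (List.infix_cons_iff).mp h with hpre | hinf
      · exfalso
        obtain ⟨r, hr⟩ := hpre
        simp only [List.cons_append, List.nil_append, List.cons.injEq] at hr
        exact hab ⟨hr.1.symm, hr.2.1.symm⟩
      · exact hinf
    simp only [pvRep1, if_neg hab, List.length_cons]
    exact Nat.succ_lt_succ (ih hni)

-- the while '__' in safe_name: safe_name = safe_name.replace('__','_') loop of A
def pvAWhile (s : List Char) : List Char :=
  if h : PySem.Chars.isIn ['_','_'] s = true then
    pvAWhile (PySem.Chars.replace s ['_','_'] ['_'])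
  else s
termination_by s.length
decreasing_by
  rw [pvReplace_eq_rep1]
  exact pvRep1_len_lt s ((PySem.Chars.isIn_iff_infix _ _).mp h)

def sanitize_metric_name_py (name : String) : String :=
  -- ''.join(c if c.isalnum() else '_' for c in name.lower()) : char-by-char map over the lowered string (exact)
  let safe0 : List Char := (PySem.Str.lower name).toList.map (fun c => if PySem.Chars.isalnum c then c else '_')
  -- while '__' in safe_name: safe_name = safe_name.replace('__', '_')
  let safe1 : List Char := pvAWhile safe0
  -- safe_name.strip('_')
  let safe2 : List Char := PySem.Chars.stripChars safe1 ['_']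
  -- if safe_name and safe_name[0].isdigit(): safe_name = 'metric_' + safe_name
  let safe3 : List Char := match safe2 with
    | [] => []
    | c :: _ => if PySem.Chars.isdigit c then "metric_".toList ++ safe2 else safe2
  -- return safe_name or 'unnamed_metric'
  if safe3 = [] then "unnamed_metric" else String.ofList safe3

-- ===== PORT B =====
def sanitize_metric_name_py_alt (name : String) : String :=
  let lowered := PySem.Str.lower name
  -- for c in lowered: … parts/pending state machine (parts kept as the list of chars appended; ''.join of 1-char strings = that list)
  let st : List Char × Bool := lowered.toList.foldl
    (fun (st : List Char × Bool) c =>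
      if PySem.Chars.isalnum c then
        (st.1 ++ (if st.1 ≠ [] ∧ st.2 = true then ['_', c] else [c]), false)
      else (st.1, true))
    ([], false)
  let result : List Char := st.1
  -- if result and result[0].isdigit(): result = 'metric_' + result
  let result2 : List Char := match result with
    | [] => []
    | c :: _ => if PySem.Chars.isdigit c then "metric_".toList ++ result else result
  -- return result or 'unnamed_metric'
  if result2 = [] then "unnamed_metric" else String.ofList result2

-- ===== PRECONDITION & SPEC =====
def Spec_sanitize_metric_name_py (name : String) (out : String) : Prop := out = sanitize_metric_name_py_alt name
instance (name : String) (out : String) : Decidable (Spec_sanitize_metric_name_py name out) := by unfold Spec_sanitize_metric_name_py; infer_instance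

-- ===== CLAIM (what is proved, stated in full; the proofs are below) =====
def Claim_equal_sanitize_metric_name_py : Prop := ∀ (name : String), Dom_sanitize_metric_name_py name → Spec_sanitize_metric_name_py name (sanitize_metric_name_py name)

-- ===== LEMMAS AND PROOFS =====

-- normal form: every maximal run of underscores squeezed to a single '_'
def pvCollapse : List Char → List Char
  | [] => []
  | [c] => [c]
  | a :: b :: t => if a = '_' ∧ b = '_' then pvCollapse (b :: t) else a :: pvCollapse (b :: t)

theorem pvCollapse_fix (l : List Char) (h : ¬ ['_','_'] <:+: l) : pvCollapse l = l := by
  induction l using pvCollapse.induct with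
  | case1 => rfl
  | case2 c => rfl
  | case3 a b t hab ih =>
    exact absurd (List.infix_cons_iff.mpr (Or.inl ⟨t, by simp [hab.1, hab.2]⟩)) h
  | case4 a b t hab ih =>
    have : ¬ ['_','_'] <:+: (b :: t) := fun hh => h (List.infix_cons hh)
    simp [pvCollapse, if_neg hab, ih this]

theorem pvCollapse_rep1_cons : ∀ (t : List Char) (c : Char),
    pvCollapse (c :: pvRep1 t) = pvCollapse (c :: t) := by
  intro t
  induction t using pvRep1.induct with
  | case1 => intro c; rfl
  | case2 b => intro c; rfl
  | case3 a b t hab ih =>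
    intro c
    obtain ⟨ha, hb⟩ := hab; subst ha; subst hb
    have key : pvCollapse ('_' :: pvRep1 t) = pvCollapse ('_' :: t) := ih '_'
    by_cases hc : c = '_'
    · subst hc
      rw [show pvRep1 ('_' :: '_' :: t) = '_' :: pvRep1 t from by simp [pvRep1]]
      show pvCollapse ('_' :: '_' :: pvRep1 t) = pvCollapse ('_' :: '_' :: '_' :: t)
      rw [show pvCollapse ('_' :: '_' :: pvRep1 t) = pvCollapse ('_' :: pvRep1 t) from by
        simp [pvCollapse]]
      rw [key]
      simp [pvCollapse]
    · rw [show pvRep1 ('_' :: '_' :: t) = '_' :: pvRep1 t from by simp [pvRep1]]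
      show pvCollapse (c :: '_' :: pvRep1 t) = pvCollapse (c :: '_' :: '_' :: t)
      rw [show pvCollapse (c :: '_' :: pvRep1 t) = c :: pvCollapse ('_' :: pvRep1 t) from by
        simp [pvCollapse, hc]]
      rw [key]
      simp [pvCollapse, hc]
  | case4 a b t hab ih =>
    intro c
    simp only [pvRep1, if_neg hab]
    by_cases hca : c = '_' ∧ a = '_'
    · rw [show pvCollapse (c :: a :: pvRep1 (b :: t)) = pvCollapse (a :: pvRep1 (b :: t)) from by
        cases pvRep1 (b :: t) <;> simp [pvCollapse, hca.1, hca.2]]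
      rw [ih a]
      simp [pvCollapse, hca.1, hca.2]
    · rw [show pvCollapse (c :: a :: pvRep1 (b :: t)) = c :: pvCollapse (a :: pvRep1 (b :: t)) from by
        cases pvRep1 (b :: t) <;> simp [pvCollapse, hca]]
      rw [ih a]
      simp [pvCollapse, hca]

theorem pvCollapse_rep1 (l : List Char) : pvCollapse (pvRep1 l) = pvCollapse l := by
  match l with
  | [] => rfl
  | [c] => rfl
  | a :: b :: t =>
    by_cases hab : a = '_' ∧ b = '_'
    · obtain ⟨ha, hb⟩ := hab; subst ha; subst hb
      rw [show pvRep1 ('_' :: '_' :: t) = '_' :: pvRep1 t from by simp [pvRep1]]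
      rw [pvCollapse_rep1_cons t '_']
      simp [pvCollapse]
    · simp only [pvRep1, if_neg hab]
      rw [show pvCollapse (a :: pvRep1 (b :: t)) = pvCollapse (a :: b :: t) from
        pvCollapse_rep1_cons (b :: t) a]

theorem pvAWhile_eq_collapse (l : List Char) : pvAWhile l = pvCollapse l := by
  induction l using pvAWhile.induct with
  | case1 s h ih =>
    rw [pvAWhile, dif_pos h, ih, pvReplace_eq_rep1, pvCollapse_rep1]
  | case2 s _h =>
    rw [pvAWhile, dif_neg _h, pvCollapse_fix]
    intro hinf
    exact _h ((PySem.Chars.isIn_iff_infix _ _).mpr hinf)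

-- strip machinery
def pvQ : Char → Bool := fun c => c == '_'

def pvRstrip (y : List Char) : List Char := (List.dropWhile pvQ y.reverse).reverse

theorem pvStripChars_eq (s : List Char) :
    PySem.Chars.stripChars s ['_'] = pvRstrip (List.dropWhile pvQ s) := by
  have hq : (fun c => List.contains ['_'] c) = pvQ := by
    funext c
    simp only [List.contains_cons, List.contains_nil, Bool.or_false, pvQ]
  rw [PySem.Chars.stripChars, pvRstrip, hq]

theorem pvRstrip_cons_ne (c : Char) (y : List Char) (hc : c ≠ '_') :
    pvRstrip (c :: y) = c :: pvRstrip y := by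
  unfold pvRstrip
  rw [List.reverse_cons, List.dropWhile_append]
  by_cases h : (List.dropWhile pvQ y.reverse).isEmpty = true
  · rw [if_pos h, List.isEmpty_iff.mp h]
    have hq : pvQ c = false := by simp [pvQ, hc]
    simp [hq]
  · rw [if_neg (by simp [h])]
    simp

theorem pvRstrip_cons_us (y : List Char) :
    pvRstrip ('_' :: y) = if pvRstrip y = [] then [] else '_' :: pvRstrip y := by
  unfold pvRstrip
  rw [List.reverse_cons, List.dropWhile_append]
  by_cases h : (List.dropWhile pvQ y.reverse).isEmpty = true
  · rw [if_pos h, List.isEmpty_iff.mp h, if_pos (by simp)]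
    simp [pvQ]
  · rw [if_neg (by simp [h])]
    rw [if_neg (by simp [List.isEmpty_iff] at h; simp [h])]
    simp

-- B's scan, recursively (emit: before first alnum; emitIn: inside, no pending; emitIn': inside, pending separator)
mutual
def pvEmit : List Char → List Char
  | [] => []
  | c :: t => if PySem.Chars.isalnum c then c :: pvEmitIn t else pvEmit t

def pvEmitIn : List Char → List Char
  | [] => []
  | c :: t => if PySem.Chars.isalnum c then c :: pvEmitIn t else pvEmitIn' t

def pvEmitIn' : List Char → List Char
  | [] => []
  | c :: t => if PySem.Chars.isalnum c then '_' :: c :: pvEmitIn t else pvEmitIn' t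
end

-- mask a char / list the way A does
def pvMask (l : List Char) : List Char := l.map (fun c => if PySem.Chars.isalnum c then c else '_')

theorem pvAlnum_ne_us {c : Char} (h : PySem.Chars.isalnum c = true) : c ≠ '_' := by
  intro hc; subst hc; exact absurd h (by decide)

theorem pvCollapse_cons_ne (c : Char) (x : List Char) (hc : c ≠ '_') :
    pvCollapse (c :: x) = c :: pvCollapse x := by
  cases x <;> simp [pvCollapse, hc]

theorem pvCollapse_us_us (x : List Char) :
    pvCollapse ('_' :: '_' :: x) = pvCollapse ('_' :: x) := by
  simp [pvCollapse]

theorem pvEmitIn_spec : ∀ t : List Char,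
    pvEmitIn t = pvRstrip (pvCollapse (pvMask t)) ∧
    pvEmitIn' t = pvRstrip (pvCollapse ('_' :: pvMask t)) := by
  intro t
  induction t with
  | nil =>
    constructor
    · rfl
    · show pvEmitIn' [] = pvRstrip ['_']
      simp [pvEmitIn', pvRstrip, List.dropWhile, pvQ]
  | cons c t ih =>
    obtain ⟨ih1, ih2⟩ := ih
    by_cases hc : PySem.Chars.isalnum c = true
    · have hne := pvAlnum_ne_us hc
      constructor
      · rw [show pvMask (c :: t) = c :: pvMask t from by simp [pvMask, hc]]
        rw [pvCollapse_cons_ne c _ hne, pvRstrip_cons_ne c _ hne]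
        simp [pvEmitIn, hc, ih1]
      · rw [show pvMask (c :: t) = c :: pvMask t from by simp [pvMask, hc]]
        rw [show pvCollapse ('_' :: c :: pvMask t) = '_' :: pvCollapse (c :: pvMask t) from by
          simp [pvCollapse, hne]]
        rw [pvCollapse_cons_ne c _ hne, pvRstrip_cons_us, pvRstrip_cons_ne c _ hne]
        rw [if_neg (by simp)]
        simp [pvEmitIn', hc, ih1]
    · have hm : pvMask (c :: t) = '_' :: pvMask t := by simp [pvMask, hc]
      constructor
      · rw [hm]; simpa [pvEmitIn, hc] using ih2
      · rw [hm, pvCollapse_us_us]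
        simpa [pvEmitIn', hc] using ih2

theorem pvLstrip_collapse_us (x : List Char) :
    List.dropWhile pvQ (pvCollapse ('_' :: x)) = List.dropWhile pvQ (pvCollapse x) := by
  cases x with
  | nil => simp [pvCollapse, List.dropWhile, pvQ]
  | cons b t =>
    by_cases hb : b = '_'
    · subst hb; rw [pvCollapse_us_us]
    · rw [show pvCollapse ('_' :: b :: t) = '_' :: pvCollapse (b :: t) from by
        simp [pvCollapse, hb]]
      simp [List.dropWhile, pvQ]

theorem pvEmit_spec : ∀ t : List Char,
    pvEmit t = pvRstrip (List.dropWhile pvQ (pvCollapse (pvMask t))) := by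
  intro t
  induction t with
  | nil => rfl
  | cons c t ih =>
    by_cases hc : PySem.Chars.isalnum c = true
    · have hne := pvAlnum_ne_us hc
      rw [show pvMask (c :: t) = c :: pvMask t from by simp [pvMask, hc]]
      rw [pvCollapse_cons_ne c _ hne]
      rw [show List.dropWhile pvQ (c :: pvCollapse (pvMask t)) = c :: pvCollapse (pvMask t) from by
        simp [pvQ, hne]]
      rw [pvRstrip_cons_ne c _ hne]
      simp [pvEmit, hc, (pvEmitIn_spec t).1]
    · rw [show pvMask (c :: t) = '_' :: pvMask t from by simp [pvMask, hc]]
      rw [pvLstrip_collapse_us]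
      simpa [pvEmit, hc] using ih

-- B's foldl state machine computes the pvEmit family
def pvStep : List Char × Bool → Char → List Char × Bool := fun st c =>
  if PySem.Chars.isalnum c then
    (st.1 ++ (if st.1 ≠ [] ∧ st.2 = true then ['_', c] else [c]), false)
  else (st.1, true)

theorem pvFoldl_emit : ∀ (l : List Char) (p : List Char) (pend : Bool),
    (List.foldl pvStep (p, pend) l).1 =
      p ++ (if p = [] then pvEmit l else if pend then pvEmitIn' l else pvEmitIn l) := by
  intro l
  induction l with
  | nil =>
    intro p pend
    split_ifs <;> simp [pvEmit, pvEmitIn, pvEmitIn']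
  | cons c t ih =>
    intro p pend
    by_cases hc : PySem.Chars.isalnum c = true
    · have hstep : pvStep (p, pend) c =
          (p ++ (if p ≠ [] ∧ pend = true then ['_', c] else [c]), false) := by
        simp [pvStep, hc]
      rw [List.foldl_cons, hstep]
      by_cases hp : p = []
      · subst hp
        rw [if_neg (by simp), List.nil_append, ih [c] false,
          if_neg (by simp), if_neg (by simp), if_pos rfl]
        simp [pvEmit, hc]
      · cases pend with
        | false =>
          rw [if_neg (by simp), ih (p ++ [c]) false,
            if_neg (by simp), if_neg (by simp), if_neg hp, if_neg (by simp)]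
          simp [pvEmitIn, hc]
        | true =>
          rw [if_pos ⟨hp, rfl⟩, ih (p ++ ['_', c]) false,
            if_neg (by simp), if_neg (by simp), if_neg hp, if_pos rfl]
          simp [pvEmitIn', hc]
    · have hstep : pvStep (p, pend) c = (p, true) := by simp [pvStep, hc]
      rw [List.foldl_cons, hstep, ih p true]
      by_cases hp : p = []
      · simp [hp, pvEmit, hc]
      · rw [if_neg hp, if_neg hp, if_pos rfl]
        cases pend <;> simp [pvEmitIn, pvEmitIn', hc]

theorem pvMain (l : List Char) :
    (List.foldl pvStep ([], false) l).1 = PySem.Chars.stripChars (pvAWhile (pvMask l)) ['_'] := by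
  rw [pvFoldl_emit l [] false, if_pos rfl, List.nil_append, pvEmit_spec l,
    pvAWhile_eq_collapse, pvStripChars_eq]

-- ===== VERDICT (by name: the statement is the Claim_ definition above) =====
theorem sanitize_metric_name_py_spec : Claim_equal_sanitize_metric_name_py := by
  intro name _
  show sanitize_metric_name_py name = sanitize_metric_name_py_alt name
  unfold sanitize_metric_name_py sanitize_metric_name_py_alt
  dsimp only
  rw [show List.map (fun c => if PySem.Chars.isalnum c = true then c else '_')
        (PySem.Str.lower name).toList = pvMask (PySem.Str.lower name).toList from rfl,
    ← pvMain]
  rfl
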